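-- pv_equiv track=rewrite | github.com/triwinds/ArknightsAutoHelper | Arknights/addons/contrib/only720/auto_shift/__init__.py | group_pos
-- ===== SOURCE A (Python) =====
-- def group_pos(values):
--     tmp = {}
--     for value in values:
--         flag = True
--         for k, v in tmp.items():
--             if abs(value - k) < 20:
--                 v.append(value)
--                 flag = False
--                 break
--         if flag:
--             tmp[value] = [value]
--     res = [sum(v) // len(v) for v in tmp.values()]
--     res.sort()
--     return res
-- ===== SOURCE B (Python) =====
-- def group_pos(values):
--     # Bucket keys by value // 20: greedy keys are pairwise >= 20 apart, so each
--     # bucket holds at most one group; a value can only match the groups in its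
--     # own or the two adjacent buckets, making each step O(1) instead of a scan.
--     buckets = {}  # bucket -> (insertion_index, key, running_sum, count)
--     n = 0
--     for v in values:
--         b = v // 20
--         best = None
--         for cb in (b - 1, b, b + 1):
--             e = buckets.get(cb)
--             if e is not None and abs(v - e[1]) < 20 and (best is None or e[0] < best[0]):
--                 best = e
--         if best is None:
--             buckets[b] = (n, v, v, 1)
--             n += 1
--         else:
--             idx, k, s, c = best
--             buckets[k // 20] = (idx, k, s + v, c + 1)
--     res = sorted(s // c for _, _, s, c in buckets.values())
--     return res
-- ===== Notes on version B (the rewrite author's own statement) =====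
-- stated objective: faster
-- what changed: A scans every existing group for each value (inner loop over tmp.items()); B buckets groups by key//20 (greedy keys are pairwise >= 20 apart, so each bucket holds at most one group) and checks only the 3 candidate buckets per value, keeping running sums/counts instead of member lists.
import Mathlib
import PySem

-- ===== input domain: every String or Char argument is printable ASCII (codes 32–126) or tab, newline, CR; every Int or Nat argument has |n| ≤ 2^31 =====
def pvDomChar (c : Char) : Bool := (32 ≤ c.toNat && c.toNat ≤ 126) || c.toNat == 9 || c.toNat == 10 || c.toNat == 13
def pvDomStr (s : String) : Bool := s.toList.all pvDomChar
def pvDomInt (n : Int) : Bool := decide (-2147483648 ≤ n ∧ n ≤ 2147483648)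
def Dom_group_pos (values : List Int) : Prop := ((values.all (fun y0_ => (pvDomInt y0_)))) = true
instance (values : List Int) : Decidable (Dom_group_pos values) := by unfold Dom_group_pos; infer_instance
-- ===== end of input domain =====

-- B replaces A's inner scan over all groups by a bucket dictionary keyed by value // 20
-- (each step looks at 3 buckets instead of every group): objective 'faster', O(n^2) → O(n + m log m).

-- ===== PORT A =====
-- inner 'for k, v in tmp.items(): if abs(value-k) < 20: … break' — returns the first key within 20, if any
def pyFirstKey (value : Int) : List (Int × List Int) → Option Int
  | [] => none
  | (k, _) :: rest => if |value - k| < 20 then some k else pyFirstKey value rest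

def groupStepA (tmp : PySem.Dict Int (List Int)) (value : Int) : PySem.Dict Int (List Int) :=
  match pyFirstKey value tmp.items with
  | some k => tmp.modify k [] (fun l => l ++ [value])   -- v.append(value)
  | none => tmp.insert value [value]

def group_pos (values : List Int) : List Int :=
  let tmp := values.foldl groupStepA PySem.Dict.empty
  let res := tmp.values.map (fun v => PySem.Int.floordiv v.sum (v.length : Int))
  PySem.List.sorted res (fun x => x) false

-- ===== PORT B =====
-- bucket entry: (insertion_index, key, running_sum, count)
def bestCand (v : Int) (buckets : PySem.Dict Int (Int × Int × Int × Int))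
    (best : Option (Int × Int × Int × Int)) (cb : Int) : Option (Int × Int × Int × Int) :=
  match buckets.get? cb with
  | none => best
  | some e =>
      if (decide (|v - e.2.1| < 20) && best.all (fun b0 => decide (e.1 < b0.1))) then some e else best

def groupStepB (st : PySem.Dict Int (Int × Int × Int × Int) × Int) (v : Int) :
    PySem.Dict Int (Int × Int × Int × Int) × Int :=
  let b := PySem.Int.floordiv v 20
  match [b - 1, b, b + 1].foldl (bestCand v st.1) none with
  | none => (st.1.insert b (st.2, v, v, 1), st.2 + 1)
  | some (idx, k, s, c) => (st.1.insert (PySem.Int.floordiv k 20) (idx, k, s + v, c + 1), st.2)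

def group_pos_alt (values : List Int) : List Int :=
  let st := values.foldl groupStepB (PySem.Dict.empty, 0)
  PySem.List.sorted (st.1.values.map (fun e => PySem.Int.floordiv e.2.2.1 e.2.2.2)) (fun x => x) false

-- ===== PRECONDITION & SPEC =====
def Spec_group_pos (values : List Int) (out : List Int) : Prop := out = group_pos_alt values
instance (values : List Int) (out : List Int) : Decidable (Spec_group_pos values out) := by unfold Spec_group_pos; infer_instance

-- ===== CLAIM (what is proved, stated in full; the proofs are below) =====
def Claim_equal_group_pos : Prop := ∀ (values : List Int), Dom_group_pos values → Spec_group_pos values (group_pos values)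

-- ===== LEMMAS AND PROOFS =====

-- the bucket entry B keeps for the i-th group (key, members) of A
def entryOf (i : Nat) (p : Int × List Int) : Int × (Int × Int × Int × Int) :=
  (PySem.Int.floordiv p.1 20, ((i : Int), p.1, p.2.sum, (p.2.length : Int)))

def GPInv (dA : PySem.Dict Int (List Int)) (dB : PySem.Dict Int (Int × Int × Int × Int)) (n : Int) : Prop :=
  dB.items = dA.items.mapIdx entryOf ∧ n = (dA.items.length : Int) ∧
    dA.keys.Pairwise (fun a b => 20 ≤ |a - b|)

lemma fdiv_range {v k : Int} (h : |v - k| < 20) :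
    PySem.Int.floordiv k 20 = PySem.Int.floordiv v 20 - 1 ∨
    PySem.Int.floordiv k 20 = PySem.Int.floordiv v 20 ∨
    PySem.Int.floordiv k 20 = PySem.Int.floordiv v 20 + 1 := by
  rw [abs_sub_lt_iff] at h
  rw [PySem.Int.floordiv_eq_ediv_of_pos (by norm_num), PySem.Int.floordiv_eq_ediv_of_pos (by norm_num)]
  omega

lemma close_of_eq_fdiv {a b : Int} (h : PySem.Int.floordiv a 20 = PySem.Int.floordiv b 20) :
    |a - b| < 20 := by
  rw [abs_sub_lt_iff]
  rw [PySem.Int.floordiv_eq_ediv_of_pos (by norm_num), PySem.Int.floordiv_eq_ediv_of_pos (by norm_num)] at h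
  omega

lemma pyFirstKey_eq_find? (v : Int) (L : List (Int × List Int)) :
    pyFirstKey v L = (L.find? (fun p => decide (|v - p.1| < 20))).map Prod.fst := by
  induction L with
  | nil => rfl
  | cons p L ih =>
    obtain ⟨k, l⟩ := p
    simp only [pyFirstKey, List.find?_cons]
    by_cases h : |v - k| < 20 <;> simp [h, ih]

-- B's inner loop seen abstractly: keep the candidate of minimal insertion index
def minStep (best : Option (Int × Int × Int × Int)) (e : Int × Int × Int × Int) :
    Option (Int × Int × Int × Int) :=
  match best with
  | none => some e
  | some b0 => if e.1 < b0.1 then some e else some b0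

def matchEnt (buckets : PySem.Dict Int (Int × Int × Int × Int)) (v cb : Int) :
    Option (Int × Int × Int × Int) :=
  match buckets.get? cb with
  | none => none
  | some e => if |v - e.2.1| < 20 then some e else none

lemma fold_bestCand (v : Int) (buckets : PySem.Dict Int (Int × Int × Int × Int)) :
    ∀ (cbs : List Int) (best : Option (Int × Int × Int × Int)),
    cbs.foldl (bestCand v buckets) best = (cbs.filterMap (matchEnt buckets v)).foldl minStep best := by
  intro cbs
  induction cbs with
  | nil => intro best; rfl
  | cons cb cbs ih =>
    intro best
    simp only [List.foldl_cons, List.filterMap_cons]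
    cases hg : buckets.get? cb with
    | none =>
      have hme : matchEnt buckets v cb = none := by simp [matchEnt, hg]
      rw [hme]
      have hbc : bestCand v buckets best cb = best := by simp [bestCand, hg]
      rw [hbc]; exact ih best
    | some e =>
      by_cases hm : |v - e.2.1| < 20
      · have hme : matchEnt buckets v cb = some e := by simp [matchEnt, hg, hm]
        rw [hme]
        simp only [List.foldl_cons]
        cases best with
        | none =>
          have hbc : bestCand v buckets none cb = some e := by simp [bestCand, hg, hm]
          rw [hbc]
          have : minStep none e = some e := rfl
          rw [this]; exact ih _
        | some b0 =>
          by_cases hlt : e.1 < b0.1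
          · have hbc : bestCand v buckets (some b0) cb = some e := by
              simp [bestCand, hg, hm, hlt, Option.all]
            have hms : minStep (some b0) e = some e := by simp [minStep, hlt]
            rw [hbc, hms]; exact ih _
          · have hbc : bestCand v buckets (some b0) cb = some b0 := by
              simp [bestCand, hg, hm, hlt, Option.all]
            have hms : minStep (some b0) e = some b0 := by simp [minStep, hlt]
            rw [hbc, hms]; exact ih _
      · have hme : matchEnt buckets v cb = none := by simp [matchEnt, hg, hm]
        rw [hme]
        have hbc : bestCand v buckets best cb = best := by
          simp [bestCand, hg, hm]
        rw [hbc]; exact ih best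

lemma minStep_cases (best : Option (Int × Int × Int × Int)) (x : Int × Int × Int × Int) :
    ∃ m, minStep best x = some m ∧ (m = x ∨ best = some m) ∧ m.1 ≤ x.1 ∧
      (∀ b0, best = some b0 → m.1 ≤ b0.1) := by
  cases best with
  | none => exact ⟨x, rfl, Or.inl rfl, le_refl _, by intro b0 h; cases h⟩
  | some b0 =>
    by_cases h : x.1 < b0.1
    · refine ⟨x, by simp [minStep, h], Or.inl rfl, le_refl _, ?_⟩
      intro b1 hb; cases hb; omega
    · refine ⟨b0, by simp [minStep, h], Or.inr rfl, by omega, ?_⟩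
      intro b1 hb; cases hb; exact le_refl _

lemma foldl_minStep_eq_none {l : List (Int × Int × Int × Int)} :
    ∀ best, l.foldl minStep best = none → l = [] := by
  induction l with
  | nil => intro _ _; rfl
  | cons x l ih =>
    intro best h
    exfalso
    simp only [List.foldl_cons] at h
    obtain ⟨m, hm, -⟩ := minStep_cases best x
    rw [hm] at h
    have hl := ih (some m) h
    subst hl
    simp at h

lemma foldl_minStep_some {l : List (Int × Int × Int × Int)} :
    ∀ (best : Option (Int × Int × Int × Int)) (e), l.foldl minStep best = some e →
    (best = some e ∨ e ∈ l) ∧ (∀ b0, best = some b0 → e.1 ≤ b0.1) ∧ (∀ x ∈ l, e.1 ≤ x.1) := by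
  induction l with
  | nil =>
    intro best e h
    refine ⟨Or.inl h, ?_, by simp⟩
    intro b0 hb; rw [hb] at h; injection h with h; rw [h]
  | cons x l ih =>
    intro best e h
    simp only [List.foldl_cons] at h
    obtain ⟨m, hm, hmem, hle, hbest⟩ := minStep_cases best x
    rw [hm] at h
    obtain ⟨h1, h2, h3⟩ := ih (some m) e h
    have hem : e.1 ≤ m.1 := h2 m rfl
    refine ⟨?_, ?_, ?_⟩
    · rcases h1 with h1 | h1
      · injection h1 with h1
        subst h1
        rcases hmem with rfl | hmem
        · exact Or.inr List.mem_cons_self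
        · exact Or.inl hmem
      · exact Or.inr (List.mem_cons_of_mem _ h1)
    · intro b0 hb
      exact le_trans hem (hbest b0 hb)
    · intro y hy
      rcases List.mem_cons.mp hy with rfl | hy
      · exact le_trans hem hle
      · exact h3 y hy

lemma mem_mapIdx_entryOf {L : List (Int × List Int)} {q : Int × (Int × Int × Int × Int)}
    (h : q ∈ L.mapIdx entryOf) : ∃ i, ∃ hi : i < L.length, q = entryOf i L[i] := by
  rw [List.mem_iff_getElem] at h
  obtain ⟨i, hi, hq⟩ := h
  refine ⟨i, by simpa using hi, ?_⟩
  rw [← hq, List.getElem_mapIdx]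

lemma map_fst_mapIdx_entryOf (L : List (Int × List Int)) :
    (L.mapIdx entryOf).map Prod.fst = L.map (fun p => PySem.Int.floordiv p.1 20) := by
  apply List.ext_getElem
  · simp
  · intro i h1 h2
    simp [entryOf]

lemma nodup_keysA {dA : PySem.Dict Int (List Int)}
    (hpw : dA.keys.Pairwise (fun a b => 20 ≤ |a - b|)) : dA.keys.Nodup := by
  refine hpw.imp ?_
  intro a b hab heq
  subst heq
  simp only [sub_self, abs_zero] at hab
  omega

-- main step preservation lemma
lemma step_inv {dA : PySem.Dict Int (List Int)} {dB : PySem.Dict Int (Int × Int × Int × Int)}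
    {n v : Int} (h : GPInv dA dB n) :
    GPInv (groupStepA dA v) (groupStepB (dB, n) v).1 (groupStepB (dB, n) v).2 := by
  obtain ⟨hB, hn, hpw⟩ := h
  have hndA : dA.keys.Nodup := nodup_keysA hpw
  have hpwItems : dA.items.Pairwise (fun p q => 20 ≤ |p.1 - q.1|) := by
    have := hpw
    rw [show dA.keys = dA.items.map Prod.fst from rfl, List.pairwise_map] at this
    exact this
  have hkeysB : dB.keys = dA.items.map (fun p => PySem.Int.floordiv p.1 20) := by
    rw [show dB.keys = dB.items.map Prod.fst from rfl, hB, map_fst_mapIdx_entryOf]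
  have hndB : dB.keys.Nodup := by
    rw [hkeysB]
    refine List.pairwise_map.mpr (hpwItems.imp ?_)
    intro p q hpq heq
    have := close_of_eq_fdiv heq
    omega
  -- membership of an entry in dB at the bucket of a group
  have hgetB : ∀ (i : Nat) (hi : i < dA.items.length),
      dB.get? (PySem.Int.floordiv (dA.items[i]).1 20) = some (entryOf i dA.items[i]).2 := by
    intro i hi
    apply PySem.Dict.get?_of_mem_items _ _ hndB
    · rw [hB, List.mem_iff_getElem]
      exact ⟨i, by simpa using hi, by rw [List.getElem_mapIdx]; rfl⟩
  cases hfk : pyFirstKey v dA.items with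
  | none =>
    -- no group within 20 of v: both sides append a fresh group
    rw [pyFirstKey_eq_find?] at hfk
    have hfind : dA.items.find? (fun p => decide (|v - p.1| < 20)) = none := by
      cases hf : dA.items.find? (fun p => decide (|v - p.1| < 20))
      · rfl
      · rw [hf] at hfk; simp at hfk
    have hnomatch : ∀ p ∈ dA.items, ¬ |v - p.1| < 20 := by
      intro p hp
      have := List.find?_eq_none.mp hfind p hp
      simpa using this
    have hcands : ∀ cb ∈ [PySem.Int.floordiv v 20 - 1, PySem.Int.floordiv v 20,
        PySem.Int.floordiv v 20 + 1], matchEnt dB v cb = none := by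
      intro cb _
      unfold matchEnt
      split
      · rfl
      next e hg =>
        have hmem := PySem.Dict.mem_items_of_get?_eq_some dB hg
        rw [hB] at hmem
        obtain ⟨i, hi, hq⟩ := mem_mapIdx_entryOf hmem
        have he2 : e.2.1 = (dA.items[i]).1 := by
          rw [show e = (entryOf i dA.items[i]).2 from congrArg Prod.snd hq]
          rfl
        have hno := hnomatch dA.items[i] (List.getElem_mem hi)
        rw [he2]
        exact if_neg hno
    have hbest : [PySem.Int.floordiv v 20 - 1, PySem.Int.floordiv v 20,
        PySem.Int.floordiv v 20 + 1].foldl (bestCand v dB) none = none := by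
      rw [fold_bestCand, List.filterMap_eq_nil_iff.mpr hcands]
      rfl
    have hstepB : groupStepB (dB, n) v =
        (dB.insert (PySem.Int.floordiv v 20) (n, v, v, 1), n + 1) := by
      simp only [groupStepB, hbest]
    have hstepA : groupStepA dA v = dA.insert v [v] := by
      unfold groupStepA
      rw [pyFirstKey_eq_find?, hfind]
      rfl
    have hcontA : dA.contains v = false := by
      by_contra hc
      have : dA.contains v = true := by
        cases h : dA.contains v
        · exact absurd h hc
        · rfl
      have hv := (PySem.Dict.contains_iff_mem_keys dA v).mp this
      rw [show dA.keys = dA.items.map Prod.fst from rfl, List.mem_map] at hv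
      obtain ⟨p, hp, hpv⟩ := hv
      have := hnomatch p hp
      rw [hpv] at this
      simp at this
    have hcontB : dB.contains (PySem.Int.floordiv v 20) = false := by
      by_contra hc
      have : dB.contains (PySem.Int.floordiv v 20) = true := by
        cases h : dB.contains (PySem.Int.floordiv v 20)
        · exact absurd h hc
        · rfl
      have hv := (PySem.Dict.contains_iff_mem_keys dB _).mp this
      rw [hkeysB, List.mem_map] at hv
      obtain ⟨p, hp, hpv⟩ := hv
      have hclose := close_of_eq_fdiv hpv
      have := hnomatch p hp
      rw [abs_sub_comm] at hclose
      omega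
    rw [hstepA, hstepB]
    refine ⟨?_, ?_, ?_⟩
    · rw [PySem.Dict.items_insert_of_not_contains _ _ hcontB,
        PySem.Dict.items_insert_of_not_contains _ _ hcontA, hB, List.mapIdx_append]
      simp only [List.mapIdx_cons, List.mapIdx_nil]
      congr 2
      unfold entryOf
      simp [hn]
    · rw [PySem.Dict.items_insert_of_not_contains _ _ hcontA]
      simp [hn]
    · rw [PySem.Dict.keys_insert_of_not_contains _ _ hcontA]
      rw [List.pairwise_append]
      refine ⟨hpw, by simp, ?_⟩
      intro a ha b hb
      rw [List.mem_singleton] at hb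
      subst hb
      rw [show dA.keys = dA.items.map Prod.fst from rfl, List.mem_map] at ha
      obtain ⟨p, hp, hpa⟩ := ha
      have := hnomatch p hp
      rw [hpa] at this
      rw [abs_sub_comm]
      omega
  | some k =>
    -- v joins the first group within 20; B finds the same group via its buckets
    rw [pyFirstKey_eq_find?] at hfk
    cases hf : dA.items.find? (fun p => decide (|v - p.1| < 20)) with
    | none => rw [hf] at hfk; simp at hfk
    | some pr =>
    rw [hf] at hfk
    obtain ⟨hprm, j, hj, hjel, hjfirst⟩ := List.find?_eq_some_iff_getElem.mp hf
    have hprk : pr.1 = k := by simpa using hfk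
    have hmatchj : |v - pr.1| < 20 := by simpa using hprm
    -- the entry B keeps for group j
    set ej : Int × Int × Int × Int := ((j : Int), pr.1, pr.2.sum, (pr.2.length : Int)) with hej
    have hejdef : (entryOf j dA.items[j]).2 = ej := by rw [hjel]; rfl
    have hbucketj : PySem.Int.floordiv pr.1 20 = PySem.Int.floordiv v 20 - 1 ∨
        PySem.Int.floordiv pr.1 20 = PySem.Int.floordiv v 20 ∨
        PySem.Int.floordiv pr.1 20 = PySem.Int.floordiv v 20 + 1 := fdiv_range hmatchj
    have hgetj : dB.get? (PySem.Int.floordiv pr.1 20) = some ej := by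
      have h0 := hgetB j hj
      rw [hjel] at h0
      exact h0
    -- every candidate is some group i with a match, so j ≤ its index
    have hcand : ∀ x ∈ [PySem.Int.floordiv v 20 - 1, PySem.Int.floordiv v 20,
        PySem.Int.floordiv v 20 + 1].filterMap (matchEnt dB v),
        ∃ i, ∃ hi : i < dA.items.length, x = (entryOf i dA.items[i]).2 ∧ j ≤ i := by
      intro x hx
      rw [List.mem_filterMap] at hx
      obtain ⟨cb, -, hcb⟩ := hx
      unfold matchEnt at hcb
      split at hcb
      · cases hcb
      next e hg =>
        split at hcb
        · rename_i hm
          injection hcb with hcb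
          have hmem := PySem.Dict.mem_items_of_get?_eq_some dB hg
          rw [hB] at hmem
          obtain ⟨i, hi, hq⟩ := mem_mapIdx_entryOf hmem
          have hxe : x = (entryOf i dA.items[i]).2 := by
            rw [← hcb]; exact congrArg Prod.snd hq
          refine ⟨i, hi, hxe, ?_⟩
          by_contra hij
          rw [not_le] at hij
          have := hjfirst i hij
          have hx21 : x.2.1 = (dA.items[i]).1 := by rw [hxe]; rfl
          rw [hcb] at hm
          rw [hx21] at hm
          simp [hm] at this
        · cases hcb
    -- ej is a candidate
    have hejmem : ej ∈ [PySem.Int.floordiv v 20 - 1, PySem.Int.floordiv v 20,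
        PySem.Int.floordiv v 20 + 1].filterMap (matchEnt dB v) := by
      rw [List.mem_filterMap]
      refine ⟨PySem.Int.floordiv pr.1 20, ?_, ?_⟩
      · rcases hbucketj with h | h | h <;>
          simp only [List.mem_cons, List.not_mem_nil, or_false] <;> tauto
      · simp only [matchEnt, hgetj]
        simp [hej, hmatchj]
    -- hence best = some ej
    have hbest : [PySem.Int.floordiv v 20 - 1, PySem.Int.floordiv v 20,
        PySem.Int.floordiv v 20 + 1].foldl (bestCand v dB) none = some ej := by
      rw [fold_bestCand]
      cases hr : ([PySem.Int.floordiv v 20 - 1, PySem.Int.floordiv v 20,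
          PySem.Int.floordiv v 20 + 1].filterMap (matchEnt dB v)).foldl minStep none with
      | none =>
        have := foldl_minStep_eq_none _ hr
        rw [this] at hejmem
        cases hejmem
      | some e =>
        obtain ⟨h1, -, h3⟩ := foldl_minStep_some _ _ hr
        rcases h1 with h1 | h1
        · cases h1
        · obtain ⟨i, hi, hxe, hji⟩ := hcand e h1
          have hle := h3 ej hejmem
          have he1 : e.1 = (i : Int) := by rw [hxe]; rfl
          have hij : i = j := by
            rw [he1] at hle
            simp [hej] at hle
            omega
          subst hij
          rw [hxe, hejdef]
    have hstepB : groupStepB (dB, n) v =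
        (dB.insert (PySem.Int.floordiv pr.1 20)
          ((j : Int), pr.1, pr.2.sum + v, (pr.2.length : Int) + 1), n) := by
      simp only [groupStepB, hbest, hej]
    have hkmem : (pr.1, pr.2) ∈ dA.items := by
      have : pr ∈ dA.items := hjel ▸ List.getElem_mem hj
      simpa using this
    have hcontA : dA.contains pr.1 = true := by
      rw [PySem.Dict.contains_iff_mem_keys]
      rw [show dA.keys = dA.items.map Prod.fst from rfl, List.mem_map]
      exact ⟨pr, by simpa using hkmem, rfl⟩
    have hcontB : dB.contains (PySem.Int.floordiv pr.1 20) = true := by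
      rw [PySem.Dict.contains_iff_mem_keys, hkeysB, List.mem_map]
      exact ⟨pr, by simpa using hkmem, rfl⟩
    have hgetD : dA.getD pr.1 [] = pr.2 :=
      PySem.Dict.getD_of_mem_items dA hkmem hndA []
    have hstepA : groupStepA dA v = dA.insert pr.1 (pr.2 ++ [v]) := by
      unfold groupStepA
      rw [pyFirstKey_eq_find?, hf]
      simp only [Option.map_some]
      unfold PySem.Dict.modify
      rw [hgetD]
    rw [hstepA, hstepB]
    -- index characterisations of the two overwrite positions
    have hfstj : ∀ (i : Nat) (hi : i < dA.items.length),
        ((dA.items[i]).1 = pr.1 ↔ i = j) := by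
      intro i hi
      constructor
      · intro he
        have hnd : (dA.items.map Prod.fst).Nodup := hndA
        have : (dA.items.map Prod.fst)[i]'(by simpa using hi) =
            (dA.items.map Prod.fst)[j]'(by simpa using hj) := by
          simp only [List.getElem_map]
          rw [he, hjel]
        exact hnd.getElem_inj_iff.mp this
      · intro he; subst he; rw [hjel]
    have hfdivj : ∀ (i : Nat) (hi : i < dA.items.length),
        (PySem.Int.floordiv (dA.items[i]).1 20 = PySem.Int.floordiv pr.1 20 ↔ i = j) := by
      intro i hi
      constructor
      · intro he
        have hnd : (dA.items.map (fun p => PySem.Int.floordiv p.1 20)).Nodup := by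
          rw [← hkeysB]; exact hndB
        have : (dA.items.map (fun p => PySem.Int.floordiv p.1 20))[i]'(by simpa using hi) =
            (dA.items.map (fun p => PySem.Int.floordiv p.1 20))[j]'(by simpa using hj) := by
          simp only [List.getElem_map]
          rw [he, hjel]
        exact hnd.getElem_inj_iff.mp this
      · intro he; subst he; rw [hjel]
    refine ⟨?_, ?_, ?_⟩
    · rw [PySem.Dict.items_insert_of_contains _ _ hcontB,
        PySem.Dict.items_insert_of_contains _ _ hcontA, hB]
      apply List.ext_getElem
      · simp
      · intro i h1 h2
        have hi : i < dA.items.length := by simpa using h1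
        rw [List.getElem_map, List.getElem_mapIdx, List.getElem_mapIdx, List.getElem_map]
        by_cases hij : i = j
        · subst hij
          rw [if_pos (by simp [entryOf, hjel]), if_pos (by simp [hjel])]
          simp [entryOf]
        · rw [if_neg, if_neg]
          · simp only [beq_iff_eq]
            intro hc
            exact hij ((hfstj i hi).mp hc)
          · simp only [beq_iff_eq]
            intro hc
            exact hij ((hfdivj i hi).mp (by simpa [entryOf] using hc))
    · rw [PySem.Dict.items_insert_of_contains _ _ hcontA]
      simpa using hn
    · rw [show (dA.insert pr.1 (pr.2 ++ [v])).keys =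
          ((dA.insert pr.1 (pr.2 ++ [v])).items).map Prod.fst from rfl,
        PySem.Dict.items_insert_of_contains _ _ hcontA]
      have : (List.map (fun p => if (p.1 == pr.1) = true then (pr.1, pr.2 ++ [v]) else p)
          dA.items).map Prod.fst = dA.items.map Prod.fst := by
        apply List.ext_getElem
        · simp
        · intro i h1 h2
          simp only [List.getElem_map]
          split
          · rename_i hc
            simp only [beq_iff_eq] at hc
            rw [← hc]
          · rfl
      rw [this]
      exact hpw

lemma fold_inv : ∀ (vs : List Int) (dA : PySem.Dict Int (List Int))
    (dB : PySem.Dict Int (Int × Int × Int × Int)) (n : Int), GPInv dA dB n →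
    GPInv (vs.foldl groupStepA dA) (vs.foldl groupStepB (dB, n)).1 (vs.foldl groupStepB (dB, n)).2 := by
  intro vs
  induction vs with
  | nil => intro dA dB n h; exact h
  | cons v vs ih =>
    intro dA dB n h
    simp only [List.foldl_cons]
    have hstep := step_inv (v := v) h
    have := ih (groupStepA dA v) (groupStepB (dB, n) v).1 (groupStepB (dB, n) v).2 hstep
    simpa using this

-- ===== VERDICT (by name: the statement is the Claim_ definition above) =====
theorem group_pos_spec : Claim_equal_group_pos := by
  unfold Claim_equal_group_pos
  intro values _
  unfold Spec_group_pos
  have hinv : GPInv (values.foldl groupStepA PySem.Dict.empty)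
      (values.foldl groupStepB (PySem.Dict.empty, 0)).1
      (values.foldl groupStepB (PySem.Dict.empty, 0)).2 := by
    apply fold_inv
    refine ⟨rfl, rfl, ?_⟩
    have he : (PySem.Dict.empty : PySem.Dict Int (List Int)).items = [] := rfl
    show ((PySem.Dict.empty : PySem.Dict Int (List Int)).items.map Prod.fst).Pairwise _
    rw [he]
    simp
  obtain ⟨hB, -, -⟩ := hinv
  show PySem.List.sorted ((values.foldl groupStepA PySem.Dict.empty).values.map
      (fun v => PySem.Int.floordiv v.sum (v.length : Int))) (fun x => x) false =
    PySem.List.sorted (((values.foldl groupStepB (PySem.Dict.empty, 0)).1).values.map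
      (fun e => PySem.Int.floordiv e.2.2.1 e.2.2.2)) (fun x => x) false
  congr 1
  have hv1 : (values.foldl groupStepA PySem.Dict.empty).values =
      (values.foldl groupStepA PySem.Dict.empty).items.map (fun x => x.2) := rfl
  have hv2 : ((values.foldl groupStepB (PySem.Dict.empty, 0)).1).values =
      ((values.foldl groupStepB (PySem.Dict.empty, 0)).1).items.map (fun x => x.2) := rfl
  rw [hv1, hv2, hB]
  apply List.ext_getElem
  · simp
  · intro i h1 h2
    simp [entryOf]
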